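-- pv_equiv track=rewrite | github.com/Alone17120000/project_final | python_version/bai_toan_3.py | get_transpose
-- ===== SOURCE A (Python) =====
-- def get_transpose(partition): # Hàm tính phân hoạch chuyển vị.
--     if not partition: # Nếu phân hoạch rỗng.
--         return [] # Trả về rỗng.
--     max_part = partition[0] # Lấy phần tử lớn nhất.
--     transpose = [] # Khởi tạo danh sách chuyển vị.
--     for i in range(1, max_part + 1): # Lặp qua từng cột có thể.
--         count = sum(1 for part in partition if part >= i) # Đếm số hàng dài hơn hoặc bằng i.
--         transpose.append(count) # Thêm kết quả đếm vào chuyển vị.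
--     return transpose # Trả về kết quả.
-- ===== SOURCE B (Python) =====
-- def get_transpose(partition):
--     if not partition:
--         return []
--     m = partition[0]
--     if m <= 0:
--         return []
--     freq = [0] * m
--     for p in partition:
--         if p >= 1:
--             freq[min(p, m) - 1] += 1
--     out = []
--     running = 0
--     for x in reversed(freq):
--         running += x
--         out.append(running)
--     out.reverse()
--     return out
-- ===== Notes on version B (the rewrite author's own statement) =====
-- stated objective: faster
-- what changed: Instead of rescanning the whole partition for every column i in 1..max_part (counting parts >= i), B builds a clamped frequency array in one pass over the partition and obtains every count by a single reverse running (suffix) sum.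
import Mathlib
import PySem

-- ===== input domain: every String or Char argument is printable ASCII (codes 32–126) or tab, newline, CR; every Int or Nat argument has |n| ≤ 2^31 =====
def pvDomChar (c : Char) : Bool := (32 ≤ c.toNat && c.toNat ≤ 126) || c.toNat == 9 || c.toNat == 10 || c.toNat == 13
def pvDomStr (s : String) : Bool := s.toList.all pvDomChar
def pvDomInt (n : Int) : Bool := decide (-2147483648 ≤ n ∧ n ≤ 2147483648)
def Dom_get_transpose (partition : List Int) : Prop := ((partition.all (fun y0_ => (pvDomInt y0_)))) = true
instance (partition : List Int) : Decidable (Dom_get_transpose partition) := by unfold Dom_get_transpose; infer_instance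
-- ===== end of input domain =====

-- B replaces A's per-column rescans of the partition by one frequency pass plus a reverse running (suffix) sum.
-- Both ports model the Python lists they build/update by Lean `Array` (O(1) append and assignment, like Python's list).

-- ===== PORT A =====
def get_transpose (partition : List Int) : List Int :=
  if partition = [] then []
  else
    let maxPart := PySem.List.pyGetD partition 0 0
    ((PySem.List.pyRange 1 (maxPart + 1) 1).foldl
      (fun transpose i =>
        transpose.push (partition.foldl (fun c part => if part ≥ i then c + 1 else c) 0))
      (#[] : Array Int)).toList

-- ===== PORT B =====
def get_transpose_alt (partition : List Int) : List Int :=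
  if partition = [] then []
  else
    let m := PySem.List.pyGetD partition 0 0
    if m ≤ 0 then []
    else
      let freq := partition.foldl
        (fun f p =>
          if p ≥ 1 then
            -- freq[min(p, m) - 1] += 1 ; exact here: the index is ≥ 0 and in range (1 ≤ p, 0 < m)
            f.setIfInBounds (min p m - 1).toNat (f.getD (min p m - 1).toNat 0 + 1)
          else f)
        (Array.replicate m.toNat 0)
      let st := freq.reverse.foldl
        (fun (st : Int × Array Int) x => (st.1 + x, st.2.push (st.1 + x))) (0, (#[] : Array Int))
      st.2.reverse.toList

-- ===== PRECONDITION & SPEC =====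
def Spec_get_transpose (partition : List Int) (out : List Int) : Prop := out = get_transpose_alt partition
instance (partition : List Int) (out : List Int) : Decidable (Spec_get_transpose partition out) := by unfold Spec_get_transpose; infer_instance

-- ===== CLAIM (what is proved, stated in full; the proofs are below) =====
def Claim_equal_get_transpose : Prop := ∀ (partition : List Int), Dom_get_transpose partition → Spec_get_transpose partition (get_transpose partition)

-- ===== LEMMAS AND PROOFS =====

/-- Suffix sums of a list, each shifted by `r`: element `j` is `r + (drop j).sum`. -/
def suffixSums (r : Int) : List Int → List Int
  | [] => []
  | x :: xs => (r + (x + xs.sum)) :: suffixSums r xs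

lemma length_suffixSums (r : Int) (l : List Int) : (suffixSums r l).length = l.length := by
  induction l with
  | nil => rfl
  | cons x xs ih => simp [suffixSums, ih]

lemma getElem_suffixSums (r : Int) (l : List Int) (j : Nat) (h : j < l.length) :
    (suffixSums r l)[j]'(by simpa [length_suffixSums] using h) = r + (l.drop j).sum := by
  induction l generalizing j with
  | nil => simp at h
  | cons x xs ih =>
    cases j with
    | zero => simp [suffixSums]
    | succ k => simpa [suffixSums] using ih k (by simpa using h)

lemma revscan (l : List Int) (r : Int) (acc : List Int) :
    l.reverse.foldl (fun (st : Int × List Int) x => (st.1 + x, st.2 ++ [st.1 + x])) (r, acc)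
      = (r + l.sum, acc ++ (suffixSums r l).reverse) := by
  induction l generalizing acc with
  | nil => simp [suffixSums]
  | cons x xs ih =>
    simp only [List.reverse_cons, List.foldl_append, ih, List.foldl_cons, List.foldl_nil,
      suffixSums, List.reverse_cons, List.sum_cons]
    have h : r + xs.sum + x = r + (x + xs.sum) := by ring
    rw [h, List.append_assoc]

lemma sum_set_add_one (l : List Int) (n : Nat) (hn : n < l.length) :
    (l.set n (l[n] + 1)).sum = l.sum + 1 := by
  have hsplit : l.sum = (l.take n).sum + (l[n] + (l.drop (n + 1)).sum) := by
    have h1 : l.take n ++ l[n] :: l.drop (n + 1) = l := by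
      rw [← List.drop_eq_getElem_cons hn, List.take_append_drop]
    conv_lhs => rw [← h1]
    rw [List.sum_append, List.sum_cons]
  rw [List.sum_set]
  simp only [hn, if_pos]
  omega

lemma sum_drop_set_succ (f : List Int) (i j : Nat) (hi : i < f.length) :
    ((f.set i (f[i] + 1)).drop j).sum = (f.drop j).sum + (if j ≤ i then 1 else 0) := by
  by_cases hji : j ≤ i
  · have hlt : ¬ i < j := by omega
    rw [List.drop_set, if_neg hlt]
    have hij : i - j < (f.drop j).length := by simp; omega
    have hg : f[i] = (f.drop j)[i - j]'hij := by
      rw [List.getElem_drop]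
      congr 1
      omega
    rw [hg, sum_set_add_one (f.drop j) (i - j) hij]
    simp [hji]
  · rw [List.drop_set, if_pos (by omega)]
    simp [hji]

lemma freq_fold (m : Int) (hm : 0 < m) (l f : List Int) (hf : f.length = m.toNat) :
    (l.foldl (fun g p =>
        if p ≥ 1 then
          g.set (min p m - 1).toNat (g.getD (min p m - 1).toNat 0 + 1)
        else g) f).length = m.toNat ∧
    ∀ j : Nat, j < m.toNat →
      ((l.foldl (fun g p =>
          if p ≥ 1 then
            g.set (min p m - 1).toNat (g.getD (min p m - 1).toNat 0 + 1)
          else g) f).drop j).sum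
        = (f.drop j).sum + (l.countP (fun p => decide (1 + (j : Int) ≤ p)) : Int) := by
  induction l generalizing f with
  | nil => simp [hf]
  | cons p l ih =>
    by_cases hp : p ≥ 1
    · have hidxN : (min p m - 1).toNat < f.length := by
        rw [hf]; omega
      have hstep : (if p ≥ 1 then
            f.set (min p m - 1).toNat (f.getD (min p m - 1).toNat 0 + 1)
          else f) = f.set (min p m - 1).toNat (f[(min p m - 1).toNat] + 1) := by
        rw [if_pos hp, List.getD_eq_getElem f 0 hidxN]
      have hlen : (f.set (min p m - 1).toNat (f[(min p m - 1).toNat] + 1)).length = m.toNat := by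
        simpa using hf
      obtain ⟨ihlen, ihsum⟩ := ih _ hlen
      refine ⟨by rw [List.foldl_cons, hstep]; exact ihlen, ?_⟩
      intro j hj
      rw [List.foldl_cons, hstep, ihsum j hj,
        sum_drop_set_succ f (min p m - 1).toNat j hidxN]
      have hcond : (j ≤ (min p m - 1).toNat) ↔ (1 + (j : Int) ≤ p) := by
        omega
      rw [List.countP_cons]
      by_cases hc : 1 + (j : Int) ≤ p
      · rw [if_pos (hcond.mpr hc)]
        simp [hc]
        try push_cast
        try ring
      · rw [if_neg (fun h => hc (hcond.mp h))]
        simp [hc]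
    · obtain ⟨ihlen, ihsum⟩ := ih f hf
      refine ⟨by rw [List.foldl_cons, if_neg hp]; exact ihlen, ?_⟩
      intro j hj
      have hc : ¬ (1 + (j : Int) ≤ p) := by omega
      rw [List.foldl_cons, if_neg hp, ihsum j hj, List.countP_cons]
      simp [hc]

lemma array_getD_toList (a : Array Int) (n : Nat) (d : Int) :
    a.getD n d = a.toList.getD n d := by
  simp [Array.getD_eq_getD_getElem?, List.getD_eq_getElem?_getD]

lemma toList_push_fold (f : Int → Int) (l : List Int) (a : Array Int) :
    (l.foldl (fun tr i => tr.push (f i)) a).toList = a.toList ++ l.map f := by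
  induction l generalizing a with
  | nil => simp
  | cons x xs ih => simp

lemma toList_freq_fold (m : Int) (l : List Int) (f : Array Int) :
    (l.foldl (fun f p =>
        if p ≥ 1 then
          f.setIfInBounds (min p m - 1).toNat (f.getD (min p m - 1).toNat 0 + 1)
        else f) f).toList
      = l.foldl (fun g p =>
          if p ≥ 1 then
            g.set (min p m - 1).toNat (g.getD (min p m - 1).toNat 0 + 1)
          else g) f.toList := by
  induction l generalizing f with
  | nil => rfl
  | cons p l ih =>
    by_cases hp : p ≥ 1
    · rw [List.foldl_cons, List.foldl_cons, if_pos hp, if_pos hp, ih]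
      congr 1
      rw [Array.toList_setIfInBounds, array_getD_toList]
    · rw [List.foldl_cons, List.foldl_cons, if_neg hp, if_neg hp, ih]

lemma scan_pair (l : List Int) (r : Int) (a : Array Int) :
    (l.foldl (fun (st : Int × Array Int) x => (st.1 + x, st.2.push (st.1 + x))) (r, a)).1
      = (l.foldl (fun (st : Int × List Int) x => (st.1 + x, st.2 ++ [st.1 + x])) (r, a.toList)).1
    ∧ (l.foldl (fun (st : Int × Array Int) x => (st.1 + x, st.2.push (st.1 + x))) (r, a)).2.toList
      = (l.foldl (fun (st : Int × List Int) x => (st.1 + x, st.2 ++ [st.1 + x])) (r, a.toList)).2 := by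
  induction l generalizing r a with
  | nil => exact ⟨rfl, rfl⟩
  | cons x xs ih =>
    simp only [List.foldl_cons]
    have := ih (r + x) (a.push (r + x))
    simpa [Array.toList_push] using this

theorem get_transpose_eq_alt (partition : List Int) :
    get_transpose partition = get_transpose_alt partition := by
  by_cases hnil : partition = []
  · simp [get_transpose, get_transpose_alt, hnil]
  · unfold get_transpose get_transpose_alt
    rw [if_neg hnil, if_neg hnil]
    dsimp only
    set m := PySem.List.pyGetD partition 0 0 with hmdef
    by_cases hm : m ≤ 0
    · rw [if_pos hm, PySem.List.pyRange_one_eq_nil (by omega)]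
      simp
    · rw [if_neg hm]
      have hm' : 0 < m := by omega
      -- A: the push loop over the range is a map
      rw [toList_push_fold
        (fun i => partition.foldl (fun c part => if part ≥ i then c + 1 else c) 0)
        (PySem.List.pyRange 1 (m + 1) 1) (#[] : Array Int)]
      -- B: move everything to the list level
      simp only [← Array.foldl_toList, Array.toList_reverse, toList_freq_fold,
        Array.toList_replicate]
      rw [(scan_pair _ 0 (#[] : Array Int)).2, revscan]
      simp only [List.nil_append, List.reverse_reverse]
      obtain ⟨hflen, hfsum⟩ := freq_fold m hm' partition (List.replicate m.toNat 0)
        (by simp)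
      apply List.ext_getElem
      · rw [List.length_map, PySem.List.length_pyRange_one, length_suffixSums, hflen]
        omega
      · intro j hj1 hj2
        have hj1' : j < (PySem.List.pyRange 1 (m + 1) 1).length := by
          rw [List.length_map] at hj1; exact hj1
        have hjm : j < m.toNat := by
          rw [PySem.List.length_pyRange_one] at hj1'
          omega
        rw [List.getElem_map, PySem.List.getElem_pyRange_one 1 (m + 1) j hj1',
          getElem_suffixSums 0 _ j (by rw [hflen]; exact hjm),
          hfsum j hjm]
        have hrep : ((List.replicate m.toNat (0 : Int)).drop j).sum = 0 := by
          simp [List.drop_replicate]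
        rw [hrep]
        have hfc : (fun c part => if part ≥ 1 + (j : Int) then c + 1 else c)
            = (fun (c : Int) part => if (fun p => decide (1 + (j : Int) ≤ p)) part = true then c + 1 else c) := by
          funext c part
          simp [ge_iff_le]
        rw [hfc, PySem.List.foldl_count_if]
        ring

-- ===== VERDICT (by name: the statement is the Claim_ definition above) =====
theorem get_transpose_spec : Claim_equal_get_transpose := by
  intro partition _
  unfold Spec_get_transpose
  exact get_transpose_eq_alt partition
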